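-- pv_equiv track=rewrite | github.com/marcusalenius/112-f24-code-mini-lec | helpers.py | sortDirectorsByMovies
-- ===== SOURCE A (Python) =====
-- def sortDirectorsByMovies(directors):
--     directorCounts = dict()
--     for director in directors:
--         directorCounts[director] = directorCounts.get(director, 0) + 1
--     countsDirectors = [(directorCounts[director], director)
--                        for director in directorCounts]
--     countsDirectors.sort(reverse = True)
--     return [director for _, director in countsDirectors]
-- ===== SOURCE B (Python) =====
-- def sortDirectorsByMovies(directors):
--     counts = dict()
--     for director in directors:
--         counts[director] = counts.get(director, 0) + 1
--     buckets = dict()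
--     for director, count in counts.items():
--         if count in buckets:
--             buckets[count].append(director)
--         else:
--             buckets[count] = [director]
--     result = []
--     for count in sorted(buckets, reverse=True):
--         result.extend(sorted(buckets[count], reverse=True))
--     return result
-- ===== Notes on version B (the rewrite author's own statement) =====
-- stated objective: alternative
-- what changed: replaces the single reverse sort of (count, name) tuples by inverting the frequency dict into count->directors buckets, then emitting distinct counts in descending order with each bucket's names sorted descending
import Mathlib
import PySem

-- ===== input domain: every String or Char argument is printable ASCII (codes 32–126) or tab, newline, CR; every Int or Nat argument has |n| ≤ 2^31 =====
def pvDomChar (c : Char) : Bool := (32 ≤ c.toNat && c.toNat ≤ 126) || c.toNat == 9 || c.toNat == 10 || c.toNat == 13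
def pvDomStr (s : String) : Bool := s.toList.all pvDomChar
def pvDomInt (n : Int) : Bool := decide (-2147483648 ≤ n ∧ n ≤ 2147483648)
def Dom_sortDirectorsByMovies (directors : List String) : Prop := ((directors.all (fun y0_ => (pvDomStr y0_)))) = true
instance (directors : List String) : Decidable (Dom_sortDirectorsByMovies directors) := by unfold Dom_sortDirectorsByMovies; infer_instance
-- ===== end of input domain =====

-- B replaces A's single reverse sort of (count, name) tuples by inverting the frequency dict into
-- count -> directors buckets, emitting distinct counts in descending order with each bucket's names
-- sorted descending (alternative decomposition, same asymptotic cost).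

-- ===== PORT A =====
def sortDirectorsByMovies (directors : List String) : List String :=
  let directorCounts := directors.foldl (fun d x => d.insert x (d.getD x 0 + 1)) PySem.Dict.empty
  -- the comprehension iterates the dict's keys; `directorCounts[director]` is exact as `getD _ 0`
  -- because `director` is always a key of the dict
  let countsDirectors := directorCounts.keys.map
    (fun director => ((directorCounts.getD director 0 : Int), director))
  let sortedCD := PySem.List.sorted2 countsDirectors (fun p => p.1) (fun p => p.2) true
  sortedCD.map (fun p => p.2)

-- ===== PORT B =====
def sortDirectorsByMovies_alt (directors : List String) : List String :=
  let counts := directors.foldl (fun d x => d.insert x ((d.getD x 0 : Int) + 1)) PySem.Dict.empty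
  let buckets := counts.items.foldl
    (fun b p => b.modify p.2 ([] : List String) (fun l => l ++ [p.1])) PySem.Dict.empty
  (PySem.List.sorted buckets.keys (fun c => c) true).foldl
    (fun acc c => acc ++ PySem.List.sorted (buckets.getD c []) (fun d => d) true) []

-- ===== PRECONDITION & SPEC =====
def Spec_sortDirectorsByMovies (directors : List String) (out : List String) : Prop := out = sortDirectorsByMovies_alt directors
instance (directors : List String) (out : List String) : Decidable (Spec_sortDirectorsByMovies directors out) := by unfold Spec_sortDirectorsByMovies; infer_instance

-- ===== CLAIM (what is proved, stated in full; the proofs are below) =====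
def Claim_equal_sortDirectorsByMovies : Prop := ∀ (directors : List String), Dom_sortDirectorsByMovies directors → Spec_sortDirectorsByMovies directors (sortDirectorsByMovies directors)

-- ===== LEMMAS AND PROOFS =====

theorem pv_insertBy_congr {α : Type} (f g : α → α → Bool) (h : ∀ a b, f a b = g a b)
    (x : α) (l : List α) : PySem.List.insertBy f x l = PySem.List.insertBy g x l := by
  induction l with
  | nil => rfl
  | cons y ys ih => simp [PySem.List.insertBy, h, ih]

theorem pv_sorted2_eq_sorted_lex (xs : List (Int × String)) :
    PySem.List.sorted2 xs (fun p => p.1) (fun p => p.2) true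
      = PySem.List.sorted xs (fun p => (toLex p : Int ×ₗ String)) true := by
  unfold PySem.List.sorted2 PySem.List.sorted
  simp only [reduceIte]
  congr 1
  funext acc x
  refine pv_insertBy_congr _ _ (fun a b => ?_) x acc
  rcases lt_trichotomy b.1 a.1 with h|h|h
  · simp [Prod.Lex.lt_iff, h, lt_asymm h, h.ne]
  · simp [Prod.Lex.lt_iff, h]
  · simp [Prod.Lex.lt_iff, lt_asymm h, h.ne']
    exact fun hle => absurd h (not_lt.mpr hle)

theorem pv_partition_perm (C : List Int) (L : List (Int × String))
    (hC : C.Nodup) (hmem : ∀ p ∈ L, p.1 ∈ C) :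
    (C.flatMap (fun c => L.filter (fun p => p.1 == c))).Perm L := by
  induction C generalizing L with
  | nil =>
    cases L with
    | nil => simp
    | cons p t => exact absurd (hmem p (by simp)) (by simp)
  | cons c C' ih =>
    simp only [List.flatMap_cons]
    have hflat : (C'.flatMap (fun c' => L.filter (fun p => p.1 == c'))).Perm
        (L.filter (fun p => !(p.1 == c))) := by
      have heq : (C'.flatMap (fun c' => L.filter (fun p => p.1 == c')))
          = C'.flatMap (fun c' => (L.filter (fun p => !(p.1 == c))).filter (fun p => p.1 == c')) := by
        refine List.flatMap_congr (fun c' hc' => ?_)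
        have hne : c' ≠ c := fun h => (List.nodup_cons.mp hC).1 (h ▸ hc')
        rw [List.filter_filter]
        refine List.filter_congr (fun q _ => ?_)
        by_cases h : q.1 = c'
        · simp [h, hne]
        · simp [h]
      rw [heq]
      refine ih _ (List.nodup_cons.mp hC).2 (fun p hp => ?_)
      have h1 := hmem p (List.mem_of_mem_filter hp)
      have h2 : p.1 ≠ c := by simpa using (List.mem_filter.mp hp).2
      rcases List.mem_cons.mp h1 with h | h
      · exact absurd h h2
      · exact h
    exact (List.Perm.append_left _ hflat).trans (List.filter_append_perm _ L)

theorem pv_flat_pairwise (C : List Int) (g : Int → List String)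
    (hC : C.Pairwise (fun a b => b < a))
    (hchunk : ∀ c, (g c).Pairwise (fun a b => b < a)) :
    (C.flatMap (fun c => (g c).map (fun d => ((c, d) : Int × String)))).Pairwise
      (fun a b => (toLex b : Int ×ₗ String) < toLex a) := by
  induction C with
  | nil => simp
  | cons c C' ih =>
    rw [List.flatMap_cons, List.pairwise_append]
    refine ⟨?_, ih (List.pairwise_cons.mp hC).2, ?_⟩
    · rw [List.pairwise_map]
      refine (hchunk c).imp (fun {a b} h => ?_)
      exact Prod.Lex.lt_iff.mpr (Or.inr ⟨rfl, h⟩)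
    · intro p hp q hq
      rcases List.mem_map.mp hp with ⟨d, _, rfl⟩
      rcases List.mem_flatMap.mp hq with ⟨c', hc', hq'⟩
      rcases List.mem_map.mp hq' with ⟨d', _, rfl⟩
      exact Prod.Lex.lt_iff.mpr (Or.inl ((List.pairwise_cons.mp hC).1 c' hc'))

theorem pv_perm_flatMap (C : List Int) (f g : Int → List (Int × String))
    (h : ∀ c ∈ C, (f c).Perm (g c)) : (C.flatMap f).Perm (C.flatMap g) := by
  induction C with
  | nil => simp
  | cons c C' ih =>
    simp only [List.flatMap_cons]
    exact (h c (by simp)).append (ih (fun c' hc' => h c' (by simp [hc'])))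


theorem pv_main (directors : List String) :
    sortDirectorsByMovies directors = sortDirectorsByMovies_alt directors := by
  unfold sortDirectorsByMovies sortDirectorsByMovies_alt
  dsimp only
  rw [PySem.Dict.foldl_insert_getD_add_one_eq_counter]
  set pairs : List (Int × String) :=
    (PySem.Set.ofList directors).map (fun d => ((directors.count d : Int), d)) with hpairs
  -- A's pair list is `pairs`
  have hcd : (PySem.Dict.counter directors).keys.map
      (fun director => (((PySem.Dict.counter directors).getD director 0 : Int), director)) = pairs := by
    rw [PySem.Dict.keys_counter]
    exact List.map_congr_left (fun d _ => by rw [PySem.Dict.getD_counter])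
  -- B's bucket dict is the fold of `pairs`
  have hbuckets : (PySem.Dict.counter directors).items.foldl
      (fun b p => b.modify p.2 ([] : List String) (fun l => l ++ [p.1])) PySem.Dict.empty
      = pairs.foldl (fun b p => b.modify p.1 ([] : List String) (fun l => l ++ [p.2]))
          PySem.Dict.empty := by
    rw [PySem.Dict.items_counter, List.foldl_map, hpairs, List.foldl_map]
  rw [hcd, hbuckets]
  set B := pairs.foldl (fun b p => b.modify p.1 ([] : List String) (fun l => l ++ [p.2]))
      PySem.Dict.empty with hB
  have hgetD : ∀ c, B.getD c [] = (pairs.filter (fun p => p.1 == c)).map (fun p => p.2) := by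
    intro c
    rw [hB, PySem.Dict.getD_foldl_modify_append]
    simp
  have hkeys : B.keys = PySem.Set.ofList (pairs.map (fun p => p.1)) := by
    rw [hB, PySem.Dict.keys_foldl_modify_key]
    simp [PySem.Set.update, PySem.Set.ofList_eq_foldl]
  set C := PySem.List.sorted B.keys (fun c => c) true with hC
  set N := fun c => PySem.List.sorted (B.getD c []) (fun d => d) true with hN
  have hKnd : B.keys.Nodup := hkeys ▸ PySem.Set.nodup_ofList _
  have hCnd : C.Nodup := (PySem.List.sorted_perm _ _ _).symm.nodup hKnd
  have hCgt : C.Pairwise (fun a b => b < a) :=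
    ((PySem.List.sorted_pairwise_rev _ _).and hCnd).imp
      (fun h => lt_of_le_of_ne h.1 h.2.symm)
  have hsnd : pairs.map (fun p => p.2) = PySem.Set.ofList directors := by
    rw [hpairs, List.map_map]
    exact (List.map_congr_left fun d _ => rfl).trans (List.map_id _)
  have hnames : ∀ c, ((pairs.filter (fun p => p.1 == c)).map (fun p => p.2)).Nodup := by
    intro c
    have hsub : ((pairs.filter (fun p => p.1 == c)).map (fun p => p.2)).Sublist
        (pairs.map (fun p => p.2)) := List.Sublist.map _ List.filter_sublist
    exact (hsnd ▸ PySem.Set.nodup_ofList directors).sublist hsub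
  have hNgt : ∀ c, (N c).Pairwise (fun a b => b < a) := by
    intro c
    have hnd : (N c).Nodup := by
      rw [hN]
      exact (PySem.List.sorted_perm _ _ _).symm.nodup (hgetD c ▸ hnames c)
    exact ((PySem.List.sorted_pairwise_rev _ _).and hnd).imp
      (fun h => lt_of_le_of_ne h.1 h.2.symm)
  -- the pair list B produces
  set ys := C.flatMap (fun c => (N c).map (fun d => ((c, d) : Int × String))) with hys
  have hperm : ys.Perm pairs := by
    refine (pv_perm_flatMap C _ (fun c => pairs.filter (fun p => p.1 == c)) ?_).trans
      (pv_partition_perm C pairs hCnd ?_)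
    · intro c _
      have h1 : (N c).Perm ((pairs.filter (fun p => p.1 == c)).map (fun p => p.2)) := by
        simp only [hN, hgetD]; exact PySem.List.sorted_perm _ _ _
      refine (h1.map _).trans ?_
      rw [List.map_map]
      have : ∀ p ∈ pairs.filter (fun p => p.1 == c),
          ((fun d => ((c, d) : Int × String)) ∘ fun p => p.2) p = id p := by
        intro p hp
        have hc : p.1 = c := by simpa using (List.mem_filter.mp hp).2
        obtain ⟨p1, p2⟩ := p
        simp at hc; simp [hc]
      rw [List.map_congr_left this, List.map_id]
    · intro p hp
      have : p.1 ∈ B.keys := by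
        rw [hkeys, PySem.Set.mem_ofList]
        exact List.mem_map_of_mem hp
      exact ((PySem.List.sorted_perm _ _ _).mem_iff).mpr this
  have hpw := pv_flat_pairwise C N hCgt hNgt
  have hsorted : PySem.List.sorted pairs (fun p => (toLex p : Int ×ₗ String)) true = ys :=
    PySem.List.sorted_rev_eq_of_perm_of_pairwise_gt _ _ _ hperm hpw
  rw [pv_sorted2_eq_sorted_lex, hsorted, hys, List.map_flatMap,
    PySem.List.foldl_append_eq_flatMap]
  simp [List.map_map, hN]

-- ===== VERDICT (by name: the statement is the Claim_ definition above) =====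
theorem sortDirectorsByMovies_spec : Claim_equal_sortDirectorsByMovies := by
  intro directors _
  unfold Spec_sortDirectorsByMovies
  exact pv_main directors
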